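-- pv_equiv track=rewrite | github.com/triztian/caselawcite | ETL/string_processing.py | split_clean
-- ===== SOURCE A (Python) =====
-- def flatten(l):
--     """Flattens an array of arrays
--
--     - Note: This function holds the full list in-memory
--     """
--     result = []
--     for sublist in l:
--         for item in sublist:
--             result.append(item)
--     return result
--
-- def remove_strings(src, *strings):
--     """Removes (replaces) each of the strings with an empty string"""
--     for s in strings:
--         src = src.replace(s, "")
--     return src
--
-- def clean_chars(input):
--     """Remove 'special' non name characters"""
--     return (
--         remove_strings(input, "(", ")", "_", "-", "and ", "^", ">", "<")
--         .replace("..", ".")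
--         .strip()
--     )
--
-- def split_clean(input_item):
--     """Splits each raw attorney item and cleans odd characters like parens,
--     ampersands, commas, etc and returns a single array with string names.
--     """
--     parts = input_item.split(",")
--     parts = flatten([p.split("(") for p in parts])
--     parts = flatten([p.split(")") for p in parts])
--     parts = flatten([p.split(";") for p in parts])
--
--     parts = [p.lower() for p in parts]
--     parts = [clean_chars(p) for p in parts]
--     parts = [p for p in parts if bool(p)]
--     return parts
-- ===== SOURCE B (Python) =====
-- def remove_strings(src, *strings):
--     """Removes (replaces) each of the strings with an empty string"""
--     for s in strings:
--         src = src.replace(s, "")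
--     return src
--
-- def clean_chars(input):
--     """Remove 'special' non name characters"""
--     return (
--         remove_strings(input, "(", ")", "_", "-", "and ", "^", ">", "<")
--         .replace("..", ".")
--         .strip()
--     )
--
-- def split_clean(input_item):
--     """Single-pass splitter: scan once, cutting on any of , ; ( ), then
--     lower/clean/filter each piece."""
--     parts = []
--     cur = []
--     for ch in input_item:
--         if ch in ',;()':
--             parts.append(''.join(cur))
--             cur = []
--         else:
--             cur.append(ch)
--     parts.append(''.join(cur))
--     out = []
--     for p in parts:
--         c = clean_chars(p.lower())
--         if c:
--             out.append(c)
--     return out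
-- ===== Notes on version B (the rewrite author's own statement) =====
-- stated objective: alternative
-- what changed: Replaces the four sequential split-then-flatten passes (one per delimiter) with a single left-to-right scan that cuts the string on any of the four delimiters at once, then lowercases, cleans and filters each piece in one loop; cleaning helpers are unchanged.
import Mathlib
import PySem

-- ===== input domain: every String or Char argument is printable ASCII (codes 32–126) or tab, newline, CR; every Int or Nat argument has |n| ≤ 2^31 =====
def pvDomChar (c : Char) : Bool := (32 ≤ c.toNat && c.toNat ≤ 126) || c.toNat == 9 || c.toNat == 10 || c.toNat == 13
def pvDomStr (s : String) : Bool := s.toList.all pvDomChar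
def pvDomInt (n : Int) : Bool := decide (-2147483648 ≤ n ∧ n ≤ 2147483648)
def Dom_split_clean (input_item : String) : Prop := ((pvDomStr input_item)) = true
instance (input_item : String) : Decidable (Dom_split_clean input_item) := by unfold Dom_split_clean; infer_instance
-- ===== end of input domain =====

-- B replaces A's four sequential split-then-flatten passes (one per delimiter) with a
-- single left-to-right scan cutting on any delimiter; cleaning/filter logic is unchanged.


-- shared helpers: remove_strings / clean_chars are textually identical in A and B
def removeStrings (src : List Char) (strs : List (List Char)) : List Char :=
  strs.foldl (fun s t => PySem.Chars.replace s t []) src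

def cleanChars (s : List Char) : List Char :=
  PySem.Chars.strip
    (PySem.Chars.replace
      (removeStrings s [['('], [')'], ['_'], ['-'], ['a','n','d',' '], ['^'], ['>'], ['<']])
      ['.', '.'] ['.'])

-- ===== PORT A =====
-- flatten(l): the nested append loop
def pyFlatten {α : Type} (l : List (List α)) : List α :=
  l.foldl (fun r sub => sub.foldl (fun r x => r ++ [x]) r) []

def split_clean (input_item : String) : List String :=
  let parts := PySem.Chars.splitOn input_item.toList [',']
  let parts := pyFlatten (parts.map (fun p => PySem.Chars.splitOn p ['(']))
  let parts := pyFlatten (parts.map (fun p => PySem.Chars.splitOn p [')']))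
  let parts := pyFlatten (parts.map (fun p => PySem.Chars.splitOn p [';']))
  let parts := parts.map PySem.Chars.lower
  let parts := parts.map cleanChars
  let parts := parts.filter (fun p => !p.isEmpty)
  parts.map String.ofList

-- ===== PORT B =====
def split_clean_alt (input_item : String) : List String :=
  let st := input_item.toList.foldl
    (fun (st : List (List Char) × List Char) ch =>
      if ch == ',' || ch == ';' || ch == '(' || ch == ')' then
        (st.1 ++ [st.2], [])
      else
        (st.1, st.2 ++ [ch])) ([], [])
  let parts := st.1 ++ [st.2]
  parts.foldl
    (fun out p =>
      let c := cleanChars (PySem.Chars.lower p)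
      if c.isEmpty then out else out ++ [String.ofList c]) []

-- ===== PRECONDITION & SPEC =====
def Spec_split_clean (input_item : String) (out : List String) : Prop := out = split_clean_alt input_item
instance (input_item : String) (out : List String) : Decidable (Spec_split_clean input_item out) := by unfold Spec_split_clean; infer_instance

-- ===== CLAIM (what is proved, stated in full; the proofs are below) =====
def Claim_equal_split_clean : Prop := ∀ (input_item : String), Dom_split_clean input_item → Spec_split_clean input_item (split_clean input_item)

-- ===== LEMMAS AND PROOFS =====

-- reference splitter: split a char list at every char satisfying p
def splitBy (p : Char → Bool) : List Char → List (List Char)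
  | [] => [[]]
  | c :: cs => if p c then [] :: splitBy p cs else (splitBy p cs).modifyHead (c :: ·)

theorem splitBy_ne_nil (p : Char → Bool) (l : List Char) : splitBy p l ≠ [] := by
  cases l with
  | nil => simp [splitBy]
  | cons c cs =>
    simp only [splitBy]
    split
    · simp
    · cases h : splitBy p cs with
      | nil => exact absurd h (splitBy_ne_nil p cs)
      | cons a t => simp

-- A's single-char str.split is splitBy
theorem splitOn_go_single (d : Char) :
    ∀ (fuel : Nat) (l cur : List Char) (acc : List (List Char)), l.length < fuel →
      PySem.Chars.splitOn.go [d] fuel l cur acc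
        = acc.reverse ++ (splitBy (· == d) l).modifyHead (cur.reverse ++ ·) := by
  intro fuel
  induction fuel with
  | zero => intro l cur acc h; omega
  | succ f ih =>
    intro l cur acc h
    cases l with
    | nil => simp [PySem.Chars.splitOn.go, splitBy]
    | cons c rest =>
      rw [PySem.Chars.splitOn.go]
      by_cases hc : c = d
      · have hpre : [d].isPrefixOf (c :: rest) = true := by simp [hc, List.isPrefixOf]
        rw [if_pos hpre]
        subst hc
        show PySem.Chars.splitOn.go [c] f (List.drop (0+1) (c :: rest)) [] (cur.reverse :: acc) = _
        simp only [Nat.zero_add, List.drop_succ_cons, List.drop_zero]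
        rw [ih rest [] (cur.reverse :: acc) (by simpa using Nat.lt_of_succ_lt_succ h)]
        simp [splitBy]
        cases hs : splitBy (· == c) rest with
        | nil => exact absurd hs (splitBy_ne_nil _ rest)
        | cons a t => simp
      · have hpre : [d].isPrefixOf (c :: rest) = false := by
          simp [List.isPrefixOf]; exact fun hh => absurd hh.symm hc
        rw [if_neg (by simp [hpre])]
        rw [ih rest (c :: cur) acc (by simpa using Nat.lt_of_succ_lt_succ h)]
        simp [splitBy, hc]
        cases hs : splitBy (· == d) rest with
        | nil => exact absurd hs (splitBy_ne_nil _ rest)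
        | cons a t => simp

theorem splitOn_single (d : Char) (l : List Char) :
    PySem.Chars.splitOn l [d] = splitBy (· == d) l := by
  rw [PySem.Chars.splitOn, splitOn_go_single d (l.length+1) l [] [] (by omega)]
  cases hs : splitBy (· == d) l with
  | nil => exact absurd hs (splitBy_ne_nil _ l)
  | cons a t => simp

theorem foldl_push {α : Type} : ∀ (sub r : List α), sub.foldl (fun r x => r ++ [x]) r = r ++ sub := by
  intro sub
  induction sub with
  | nil => simp
  | cons a s ihs => intro r; rw [List.foldl_cons, ihs]; simp

theorem foldl_flatten {α : Type} (l : List (List α)) :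
    ∀ init, l.foldl (fun r sub => sub.foldl (fun r x => r ++ [x]) r) init = init ++ l.flatten := by
  induction l with
  | nil => simp
  | cons h t ih =>
    intro init
    rw [List.foldl_cons, foldl_push, ih]
    simp

theorem pyFlatten_eq {α : Type} (l : List (List α)) : pyFlatten l = l.flatten := by
  unfold pyFlatten
  rw [foldl_flatten l []]
  simp

-- splitting the pieces of one split by a second delimiter = splitting once by both
theorem flatten_map_splitBy (p q : Char → Bool) (l : List Char) :
    (List.map (splitBy q) (splitBy p l)).flatten = splitBy (fun c => p c || q c) l := by
  induction l with
  | nil => simp [splitBy]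
  | cons c cs ih =>
    by_cases hp : p c
    · simp only [splitBy, hp, if_pos, Bool.true_or]
      simp [splitBy, ih]
    · simp only [splitBy, hp, Bool.false_or, if_neg, Bool.not_eq_true]
      cases h : splitBy p cs with
      | nil => exact absurd h (splitBy_ne_nil p cs)
      | cons a t =>
        rw [h] at ih
        by_cases hq : q c
        · simp only [hq, if_true]
          simp only [List.modifyHead, List.map_cons, List.flatten_cons, splitBy, hq, if_pos]
          simp only [List.map_cons, List.flatten_cons] at ih
          simp [← ih]
        · simp only [hq]
          simp only [List.modifyHead, List.map_cons, List.flatten_cons, splitBy, hq, if_neg, Bool.not_eq_true]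
          simp only [List.map_cons, List.flatten_cons] at ih
          rw [← ih]
          cases hsq : splitBy q a with
          | nil => exact absurd hsq (splitBy_ne_nil q a)
          | cons b u => simp

theorem splitBy_congr (p q : Char → Bool) (h : ∀ c, p c = q c) (l : List Char) :
    splitBy p l = splitBy q l := by
  induction l with
  | nil => rfl
  | cons c cs ih => simp [splitBy, h, ih]

-- B's scanner loop computes splitBy
theorem scan_eq_splitBy (p : Char → Bool) :
    ∀ (l : List Char) (ps : List (List Char)) (cur : List Char),
      (let st := l.foldl (fun (st : List (List Char) × List Char) ch =>
          if p ch then (st.1 ++ [st.2], []) else (st.1, st.2 ++ [ch])) (ps, cur)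
       st.1 ++ [st.2]) = ps ++ (splitBy p l).modifyHead (cur ++ ·) := by
  intro l
  induction l with
  | nil => intro ps cur; simp [splitBy]
  | cons c cs ih =>
    intro ps cur
    simp only [List.foldl_cons]
    by_cases hc : p c
    · rw [if_pos hc]
      have := ih (ps ++ [cur]) []
      simp only at this ⊢
      rw [this]
      simp [splitBy, hc]
      cases h : splitBy p cs with
      | nil => exact absurd h (splitBy_ne_nil p cs)
      | cons a t => simp
    · rw [if_neg hc]
      have := ih ps (cur ++ [c])
      simp only at this ⊢
      rw [this]
      simp [splitBy, hc]
      cases h : splitBy p cs with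
      | nil => exact absurd h (splitBy_ne_nil p cs)
      | cons a t => simp

-- B's output loop is a filtered map
theorem fold_filter (f : List Char → List Char) :
    ∀ (parts : List (List Char)) (out : List String),
      parts.foldl (fun out p => let c := f p; if c.isEmpty then out else out ++ [String.ofList c]) out
        = out ++ ((parts.map f).filter (fun c => !c.isEmpty)).map String.ofList := by
  intro parts
  induction parts with
  | nil => simp
  | cons h t ih =>
    intro out
    rw [List.foldl_cons]
    by_cases hc : (f h).isEmpty
    · show List.foldl _ (if (f h).isEmpty then out else _) t = _
      rw [if_pos hc, ih]
      simp [hc]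
    · show List.foldl _ (if (f h).isEmpty then out else _) t = _
      rw [if_neg hc, ih]
      simp [hc]

-- ===== VERDICT (by name: the statement is the Claim_ definition above) =====
theorem split_clean_spec : Claim_equal_split_clean := by
  intro input_item _
  unfold Spec_split_clean split_clean split_clean_alt
  simp only
  simp only [splitOn_single, pyFlatten_eq]
  rw [flatten_map_splitBy, flatten_map_splitBy, flatten_map_splitBy]
  rw [scan_eq_splitBy]
  rw [fold_filter (fun p => cleanChars (PySem.Chars.lower p))]
  rw [List.nil_append, List.nil_append]
  rw [splitBy_congr (fun c => ((c == ',' || c == '(') || c == ')') || c == ';')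
        (fun ch => ch == ',' || ch == ';' || ch == '(' || ch == ')')
        (by intro c
            cases h1 : c == ',' <;> cases h2 : c == '(' <;> cases h3 : c == ')' <;> cases h4 : c == ';' <;> simp [h1, h2, h3, h4])]
  cases hs : splitBy (fun ch => ch == ',' || ch == ';' || ch == '(' || ch == ')') input_item.toList with
  | nil => exact absurd hs (splitBy_ne_nil _ _)
  | cons a t => simp [List.map_map, Function.comp_def]
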